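-- pv_equiv track=rewrite | github.com/biopython/biopython | Bio/SeqIO/NibIO.py | _string_as_base_36
-- ===== SOURCE A (Python) =====
-- _powers_of_36 = [36 ** i for i in range(6)]
--
-- def _string_as_base_36(string):
--     """Interpret a string as a base-36 number as per 454 manual (PRIVATE)."""
--     total = 0
--     for c, power in zip(string[::-1], _powers_of_36):
--         # For reference: ord('0') = 48, ord('9') = 57
--         # For reference: ord('A') = 65, ord('Z') = 90
--         # For reference: ord('a') = 97, ord('z') = 122
--         if 48 <= ord(c) <= 57:
--             val = ord(c) - 22  # equivalent to: - ord('0') + 26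
--         elif 65 <= ord(c) <= 90:
--             val = ord(c) - 65
--         elif 97 <= ord(c) <= 122:
--             val = ord(c) - 97
--         else:
--             # Invalid character
--             val = 0
--         total += val * power
--     return total
-- ===== SOURCE B (Python) =====
-- def _string_as_base_36(string):
--     """Interpret a string as a base-36 number as per 454 manual (PRIVATE)."""
--     total = 0
--     for c in string[-6:]:
--         o = ord(c)
--         if 48 <= o <= 57:
--             v = o - 22
--         elif 65 <= o <= 90:
--             v = o - 65
--         elif 97 <= o <= 122:
--             v = o - 97
--         else:
--             v = 0
--         total = total * 36 + v
--     return total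
-- ===== Notes on version B (the rewrite author's own statement) =====
-- stated objective: idiomatic
-- what changed: Replaces the reversed-string zip against a precomputed power-of-36 table by Horner's method over the last six characters (string[-6:]), threading total = total*36 + val(c) forward.
import Mathlib
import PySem

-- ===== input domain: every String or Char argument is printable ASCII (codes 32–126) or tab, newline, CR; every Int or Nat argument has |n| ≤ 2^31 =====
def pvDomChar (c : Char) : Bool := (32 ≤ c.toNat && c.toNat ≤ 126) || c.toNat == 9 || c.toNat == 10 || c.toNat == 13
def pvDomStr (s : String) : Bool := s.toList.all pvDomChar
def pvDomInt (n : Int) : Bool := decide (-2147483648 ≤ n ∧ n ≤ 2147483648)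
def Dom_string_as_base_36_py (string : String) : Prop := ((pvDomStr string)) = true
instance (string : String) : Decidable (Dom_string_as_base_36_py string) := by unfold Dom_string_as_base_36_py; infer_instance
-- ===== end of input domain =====

-- B replaces the reversed zip with a power table by Horner's method over string[-6:]; objective: idiomatic.

-- ===== PORT A =====
-- _powers_of_36 = [36 ** i for i in range(6)]
def pvPowersOf36 : List Int := (PySem.List.pyRange 0 6 1).map (fun i => (36 : Int) ^ i.toNat)

def string_as_base_36_py (string : String) : Int :=
  -- for c, power in zip(string[::-1], _powers_of_36): total += val * power
  (List.zip ((PySem.List.slice? string.toList none none (-1)).getD []) pvPowersOf36).foldl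
    (fun total cp =>
      let c := cp.1
      let power := cp.2
      let val : Int :=
        if 48 ≤ (c.toNat : Int) ∧ (c.toNat : Int) ≤ 57 then (c.toNat : Int) - 22
        else if 65 ≤ (c.toNat : Int) ∧ (c.toNat : Int) ≤ 90 then (c.toNat : Int) - 65
        else if 97 ≤ (c.toNat : Int) ∧ (c.toNat : Int) ≤ 122 then (c.toNat : Int) - 97
        else 0
      total + val * power) 0

-- ===== PORT B =====
def string_as_base_36_py_alt (string : String) : Int :=
  -- for c in string[-6:]: total = total * 36 + v
  (PySem.List.slice string.toList (some (-6)) none).foldl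
    (fun total c =>
      let o : Int := c.toNat
      let v : Int :=
        if 48 ≤ o ∧ o ≤ 57 then o - 22
        else if 65 ≤ o ∧ o ≤ 90 then o - 65
        else if 97 ≤ o ∧ o ≤ 122 then o - 97
        else 0
      total * 36 + v) 0

-- ===== PRECONDITION & SPEC =====
def Spec_string_as_base_36_py (string : String) (out : Int) : Prop := out = string_as_base_36_py_alt string
instance (string : String) (out : Int) : Decidable (Spec_string_as_base_36_py string out) := by unfold Spec_string_as_base_36_py; infer_instance

-- ===== CLAIM (what is proved, stated in full; the proofs are below) =====
def Claim_equal_string_as_base_36_py : Prop := ∀ (string : String), Dom_string_as_base_36_py string → Spec_string_as_base_36_py string (string_as_base_36_py string)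

-- ===== LEMMAS AND PROOFS =====

-- the per-character base-36 digit value both programs compute
def pvChVal (c : Char) : Int :=
  if 48 ≤ (c.toNat : Int) ∧ (c.toNat : Int) ≤ 57 then (c.toNat : Int) - 22
  else if 65 ≤ (c.toNat : Int) ∧ (c.toNat : Int) ≤ 90 then (c.toNat : Int) - 65
  else if 97 ≤ (c.toNat : Int) ∧ (c.toNat : Int) ≤ 122 then (c.toNat : Int) - 97
  else 0

-- little-endian value of a digit list: S36 r = Σ val r[i] * 36^i
def pvS36 : List Char → Int
  | [] => 0
  | c :: r => pvChVal c + 36 * pvS36 r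

theorem pvPowers_eq : pvPowersOf36 = (List.range 6).map (fun i => (36 : Int) ^ i) := by decide

-- zip truncates its first argument to the second's length
theorem pv_zip_take {α β : Type} : ∀ (l₁ : List α) (l₂ : List β),
    List.zip l₁ l₂ = List.zip (l₁.take l₂.length) l₂ := by
  intro l₁
  induction l₁ with
  | nil => intro l₂; simp
  | cons a l ih =>
    intro l₂
    cases l₂ with
    | nil => simp
    | cons b l₂ => simp [List.zip_cons_cons, ih l₂]

-- A's zip-with-powers fold computes t + m * S36 r when the powers list is long enough
theorem pvA_fold : ∀ (r : List Char) (k : Nat) (m t : Int), r.length ≤ k →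
    (List.zip r ((List.range k).map (fun i => m * (36 : Int) ^ i))).foldl
      (fun total cp => total + pvChVal cp.1 * cp.2) t = t + m * pvS36 r := by
  intro r
  induction r with
  | nil => intro k m t _; simp [pvS36]
  | cons c r ih =>
    intro k m t hk
    cases k with
    | zero => simp at hk
    | succ k' =>
      rw [List.range_succ_eq_map]
      simp only [List.map_cons, List.map_map, List.zip_cons_cons, List.foldl_cons]
      have hmap : (fun i => m * (36 : Int) ^ i) ∘ Nat.succ
          = fun i => (m * 36) * (36 : Int) ^ i := by
        funext i; simp [Function.comp, pow_succ]; ring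
      rw [hmap, ih k' (m * 36) (t + pvChVal c * (m * (36 : Int) ^ 0)) (by simpa using hk)]
      simp only [pvS36, pow_zero]; ring

-- Horner's fold over the reverse of r computes t * 36^|r| + S36 r
theorem pvH_fold : ∀ (r : List Char) (t : Int),
    r.reverse.foldl (fun total c => total * 36 + pvChVal c) t
      = t * (36 : Int) ^ r.length + pvS36 r := by
  intro r
  induction r with
  | nil => intro t; simp [pvS36]
  | cons c r ih =>
    intro t
    simp only [List.reverse_cons, List.foldl_append, List.foldl_cons, List.foldl_nil, ih]
    simp [pvS36, pow_succ]; ring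

theorem pv_take6_reverse (l : List Char) :
    (l.drop (l.length - 6)).reverse = l.reverse.take 6 := by
  rw [List.reverse_drop]
  by_cases h : l.length ≤ 6
  · have h1 : l.length - (l.length - 6) = l.length := by omega
    rw [h1, List.take_of_length_le (by simp only [List.length_reverse]; omega),
        List.take_of_length_le (by simp only [List.length_reverse]; omega)]
  · have h1 : l.length - (l.length - 6) = 6 := by omega
    rw [h1]

theorem pvA_eq (string : String) :
    string_as_base_36_py string = pvS36 (string.toList.reverse.take 6) := by
  unfold string_as_base_36_py
  rw [PySem.List.slice?_none_none_neg_one]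
  simp only [Option.getD_some]
  have hf : (fun (total : Int) (cp : Char × Int) =>
      let c := cp.1
      let power := cp.2
      let val : Int :=
        if 48 ≤ (c.toNat : Int) ∧ (c.toNat : Int) ≤ 57 then (c.toNat : Int) - 22
        else if 65 ≤ (c.toNat : Int) ∧ (c.toNat : Int) ≤ 90 then (c.toNat : Int) - 65
        else if 97 ≤ (c.toNat : Int) ∧ (c.toNat : Int) ≤ 122 then (c.toNat : Int) - 97
        else 0
      total + val * power)
      = fun total cp => total + pvChVal cp.1 * cp.2 := by
    funext t cp; rfl
  rw [hf]
  have hlen : pvPowersOf36.length = 6 := by decide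
  rw [pv_zip_take, hlen, pvPowers_eq]
  have hm : ((fun i => (36 : Int) ^ i) : Nat → Int) = fun i => (1 : Int) * (36 : Int) ^ i := by
    funext i; ring
  rw [hm, pvA_fold (string.toList.reverse.take 6) 6 1 0 (by simp)]
  simp

theorem pvB_eq (string : String) :
    string_as_base_36_py_alt string = pvS36 (string.toList.reverse.take 6) := by
  unfold string_as_base_36_py_alt
  rw [PySem.List.slice_from_neg_ofNat string.toList 6 (by omega)]
  have hf : (fun (total : Int) (c : Char) =>
      let o : Int := c.toNat
      let v : Int :=
        if 48 ≤ o ∧ o ≤ 57 then o - 22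
        else if 65 ≤ o ∧ o ≤ 90 then o - 65
        else if 97 ≤ o ∧ o ≤ 122 then o - 97
        else 0
      total * 36 + v)
      = fun total c => total * 36 + pvChVal c := by
    funext t c; rfl
  rw [hf]
  have hd : string.toList.drop (string.toList.length - 6)
      = (string.toList.reverse.take 6).reverse := by
    rw [← pv_take6_reverse]; simp
  rw [hd, pvH_fold]
  simp

-- ===== VERDICT (by name: the statement is the Claim_ definition above) =====
theorem string_as_base_36_py_spec : Claim_equal_string_as_base_36_py := by
  intro string _
  unfold Spec_string_as_base_36_py
  rw [pvA_eq, pvB_eq]
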